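-- pv_equiv track=rewrite | github.com/yzgncx/Uyghur_langdata | subsequence.py | remove_initial
-- ===== SOURCE A (Python) =====
-- CONSONANTS = ['p','b','t','d','C','J','k','g','q','G','P','m','n','N','f','s','z','S','Z','x','h','r','l','j','w']
--
-- def remove_initial(s):
--     seq = list(s)
--     for i,c in enumerate(s):
--         if c in CONSONANTS:
--             seq[i] = ''
--         else:
--             break
--     return ''.join(seq)
-- ===== SOURCE B (Python) =====
-- CONSONANTS = ['p','b','t','d','C','J','k','g','q','G','P','m','n','N','f','s','z','S','Z','x','h','r','l','j','w']
--
-- _CONS = ''.join(CONSONANTS)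
--
-- def remove_initial(s):
--     return s.lstrip(_CONS)
-- ===== Notes on version B (the rewrite author's own statement) =====
-- stated objective: idiomatic
-- what changed: Replaces the index loop that blanks leading consonants in a char list and re-joins with a single str.lstrip over the consonant character set.
import Mathlib
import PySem

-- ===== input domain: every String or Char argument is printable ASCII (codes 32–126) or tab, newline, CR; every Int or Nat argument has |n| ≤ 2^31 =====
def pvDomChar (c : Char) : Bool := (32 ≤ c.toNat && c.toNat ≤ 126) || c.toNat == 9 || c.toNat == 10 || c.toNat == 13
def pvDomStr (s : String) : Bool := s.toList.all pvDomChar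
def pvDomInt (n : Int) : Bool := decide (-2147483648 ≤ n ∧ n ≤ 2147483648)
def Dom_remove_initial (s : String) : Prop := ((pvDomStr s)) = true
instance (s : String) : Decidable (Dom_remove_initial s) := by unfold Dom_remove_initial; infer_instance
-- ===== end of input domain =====

-- B replaces A's blank-then-join index loop with a single lstrip over the consonant set (idiomatic).

-- ===== PORT A =====
-- CONSONANTS: Python list of 1-char strings; iteration over s yields its characters.
def pvConsonantsA : List Char :=
  ['p','b','t','d','C','J','k','g','q','G','P','m','n','N','f','s','z','S','Z','x','h','r','l','j','w']

-- the for-loop over enumerate(s): leading consonants' seq entries become "", break at the first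
-- non-consonant leaves the rest of seq as the original characters (as 1-char strings)
def pvLoopA : List Char → List String
  | [] => []
  | c :: rest =>
      if pvConsonantsA.contains c then "" :: pvLoopA rest
      else (c :: rest).map (fun ch => String.ofList [ch])

-- ''.join(seq), written out over the list of pieces
def pvJoinAll : List String → List Char
  | [] => []
  | x :: rest => x.toList ++ pvJoinAll rest

def remove_initial (s : String) : String :=
  String.ofList (pvJoinAll (pvLoopA s.toList))

-- ===== PORT B =====
def pvConsStr : String := "pbtdCJkgqGPmnNfszSZxhrljw"   -- ''.join(CONSONANTS)

-- s.lstrip(chars) ported by hand: drop the leading run of characters in chars (exact on this domain)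
def remove_initial_alt (s : String) : String :=
  String.ofList (s.toList.dropWhile (fun c => pvConsStr.toList.contains c))

-- ===== PRECONDITION & SPEC =====
def Spec_remove_initial (s : String) (out : String) : Prop := out = remove_initial_alt s
instance (s : String) (out : String) : Decidable (Spec_remove_initial s out) := by unfold Spec_remove_initial; infer_instance

-- ===== CLAIM (what is proved, stated in full; the proofs are below) =====
def Claim_equal_remove_initial : Prop := ∀ (s : String), Dom_remove_initial s → Spec_remove_initial s (remove_initial s)

-- ===== LEMMAS AND PROOFS =====
theorem pvJoinAll_singletons (l : List Char) :
    pvJoinAll (l.map (fun ch => String.ofList [ch])) = l := by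
  induction l with
  | nil => rfl
  | cons c rest ih => simp [pvJoinAll, ih, String.toList_ofList]

theorem pvLoopA_join (l : List Char) :
    pvJoinAll (pvLoopA l) = l.dropWhile (fun c => pvConsonantsA.contains c) := by
  induction l with
  | nil => rfl
  | cons c rest ih =>
      by_cases h : c ∈ pvConsonantsA
      · simp [pvLoopA, pvJoinAll, List.dropWhile, h, ih]
      · have hm : pvJoinAll ((c :: rest).map (fun ch => String.ofList [ch])) = c :: rest :=
          pvJoinAll_singletons (c :: rest)
        simp only [List.map] at hm
        simp [pvLoopA, List.dropWhile, h, hm]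

theorem pvConsStr_toList : pvConsStr.toList = pvConsonantsA := by decide

-- ===== VERDICT (by name: the statement is the Claim_ definition above) =====
theorem remove_initial_spec : Claim_equal_remove_initial := by
  intro s _
  unfold Spec_remove_initial remove_initial remove_initial_alt
  rw [pvLoopA_join, pvConsStr_toList]
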